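-- pv_equiv track=rewrite | github.com/taylorott/Advent_of_Code | src/Year_2025/Day02/Solution.py | is_invalid_k
-- ===== SOURCE A (Python) =====
-- def is_invalid_k(id_str,k):
--     l = len(id_str)
--
--     if l%k!=0:
--         return False
--
--     l_sub = l//k
--
--     base = id_str[0:l_sub]
--
--     for i in range(k):
--         if id_str[(i*l_sub):((i+1)*l_sub)]!=base:
--             return False
--
--     return True
-- ===== SOURCE B (Python) =====
-- def is_invalid_k(id_str, k):
--     l = len(id_str)
--     if l % k != 0:
--         return False
--     return id_str[:l // k] * k == id_str
-- ===== Notes on version B (the rewrite author's own statement) =====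
-- stated objective: simpler
-- what changed: Replaces the chunk-by-chunk slicing loop with one repeated-string construction (base * k) compared against the input in a single equality test.
-- intended difference: For k < 0 with a nonempty string whose length is divisible by k, A returns True because its range(k) loop is vacuously empty, although the string is plainly not k repeated blocks; B returns False, the intended answer. — e.g. on is_invalid_k("ab", -1): A returns true, B returns false
import Mathlib
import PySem

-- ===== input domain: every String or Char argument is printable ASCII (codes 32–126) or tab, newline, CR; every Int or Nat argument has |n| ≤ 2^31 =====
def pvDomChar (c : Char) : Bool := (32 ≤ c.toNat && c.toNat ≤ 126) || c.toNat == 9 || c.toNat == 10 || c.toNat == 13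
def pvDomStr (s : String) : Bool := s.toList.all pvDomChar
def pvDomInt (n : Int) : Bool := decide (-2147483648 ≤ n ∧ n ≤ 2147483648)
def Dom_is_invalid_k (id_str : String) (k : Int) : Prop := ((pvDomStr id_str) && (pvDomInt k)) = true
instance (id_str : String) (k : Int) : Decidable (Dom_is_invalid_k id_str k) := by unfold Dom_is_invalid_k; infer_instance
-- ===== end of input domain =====

-- B replaces A's chunk-by-chunk slicing loop with one repeated-block construction and a single
-- equality test (objective: simpler).

-- ===== PORT A =====
-- literal transliteration of A: guard l % k != 0, then compare each chunk id_str[i*l_sub:(i+1)*l_sub]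
-- against base in a loop over range(k) (the early-return loop is the && fold).
def is_invalid_k (id_str : String) (k : Int) : Bool :=
  let s := id_str.toList
  let l : Int := PySem.Str.len id_str
  if PySem.Int.mod l k ≠ 0 then false
  else
    let l_sub := PySem.Int.floordiv l k
    let base := PySem.List.slice s (some 0) (some l_sub)
    (PySem.List.pyRange 0 k 1).foldl
      (fun acc i => acc && (PySem.List.slice s (some (i * l_sub)) (some ((i + 1) * l_sub)) == base))
      true

-- ===== PORT B =====
-- literal transliteration of B: same guard, then base * k == id_str (Python's s * k is empty for k ≤ 0,
-- i.e. List.replicate k.toNat).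
def is_invalid_k_alt (id_str : String) (k : Int) : Bool :=
  let s := id_str.toList
  let l : Int := PySem.Str.len id_str
  if PySem.Int.mod l k ≠ 0 then false
  else
    let base := PySem.List.slice s none (some (PySem.Int.floordiv l k))
    (List.replicate k.toNat base).flatten == s

-- ===== PRECONDITION & SPEC =====
-- Pre_ excludes only k = 0, where both A and B raise ZeroDivisionError on 'l % k'.
def Pre_is_invalid_k (id_str : String) (k : Int) : Prop := k ≠ 0
instance (id_str : String) (k : Int) : Decidable (Pre_is_invalid_k id_str k) := by
  unfold Pre_is_invalid_k; infer_instance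
def pvWitness_is_invalid_k : String × Int := ("abab", 2)

-- For k < 0 with a nonempty string whose length is divisible by k, A returns True because its
-- range(k) loop is vacuously empty, although the string is plainly not k repeated blocks;
-- B returns False, the intended answer.
def D_is_invalid_k (id_str : String) (k : Int) : Prop :=
  k < 0 ∧ id_str.toList ≠ [] ∧ k ∣ (id_str.toList.length : Int)
instance (id_str : String) (k : Int) : Decidable (D_is_invalid_k id_str k) := by
  unfold D_is_invalid_k; infer_instance

def Spec_is_invalid_k (id_str : String) (k : Int) (out : Bool) : Prop :=
  ¬ D_is_invalid_k id_str k → out = is_invalid_k_alt id_str k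
instance (id_str : String) (k : Int) (out : Bool) : Decidable (Spec_is_invalid_k id_str k out) := by
  unfold Spec_is_invalid_k; infer_instance

def pvDiffWitness_is_invalid_k : String × Int := ("ab", -1)
def pvDiffWitnessOut_is_invalid_k : Bool × Bool := (true, false)

-- ===== CLAIM (what is proved, stated in full; the proofs are below) =====
def Claim_unchanged_is_invalid_k : Prop := ∀ (id_str : String) (k : Int), Dom_is_invalid_k id_str k → Pre_is_invalid_k id_str k → Spec_is_invalid_k id_str k (is_invalid_k id_str k)
def Claim_changed_is_invalid_k : Prop := Dom_is_invalid_k (pvDiffWitness_is_invalid_k.1) (pvDiffWitness_is_invalid_k.2) ∧ Pre_is_invalid_k (pvDiffWitness_is_invalid_k.1) (pvDiffWitness_is_invalid_k.2) ∧ D_is_invalid_k (pvDiffWitness_is_invalid_k.1) (pvDiffWitness_is_invalid_k.2) ∧ is_invalid_k (pvDiffWitness_is_invalid_k.1) (pvDiffWitness_is_invalid_k.2) = pvDiffWitnessOut_is_invalid_k.1 ∧ is_invalid_k_alt (pvDiffWitness_is_invalid_k.1) (pvDiffWitness_is_invalid_k.2) = pvDiffWitnessOut_is_invalid_k.2 ∧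 pvDiffWitnessOut_is_invalid_k.1 ≠ pvDiffWitnessOut_is_invalid_k.2
def Claim_exact_is_invalid_k : Prop := ∀ (id_str : String) (k : Int), Dom_is_invalid_k id_str k → Pre_is_invalid_k id_str k → D_is_invalid_k id_str k → is_invalid_k id_str k ≠ is_invalid_k_alt id_str k

-- ===== LEMMAS AND PROOFS =====

-- foldl of && over a predicate is List.all
lemma foldl_and_eq_all {α : Type} (p : α → Bool) (l : List α) (acc : Bool) :
    l.foldl (fun a x => a && p x) acc = (acc && l.all p) := by
  induction l generalizing acc with
  | nil => simp
  | cons x xs ih => simp [List.foldl_cons, ih, Bool.and_assoc]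

-- the heart: all chunks equal b  ↔  s is n copies of b
lemma chunks_iff (n : Nat) (m : Nat) (s b : List Char) (hb : b.length = m)
    (hs : s.length = n * m) :
    ((∀ i < n, (s.drop (i * m)).take m = b) ↔ (List.replicate n b).flatten = s) := by
  induction n generalizing s with
  | zero =>
      have : s = [] := List.eq_nil_of_length_eq_zero (by simpa using hs)
      subst this; simp
  | succ n ih =>
      have hlen : s.length = m + n * m := by rw [hs]; ring
      constructor
      · intro h
        have h0 : s.take m = b := by simpa using h 0 (Nat.succ_pos n)
        have hrest : (List.replicate n b).flatten = s.drop m := by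
          refine (ih (s.drop m) (by simp [hlen])).mp ?_
          intro i hi
          have h1 := h (i + 1) (by omega)
          rw [List.drop_drop]
          have he : m + i * m = (i + 1) * m := by ring
          rw [he]; exact h1
        calc (List.replicate (n+1) b).flatten = b ++ (List.replicate n b).flatten := by
              simp [List.replicate_succ]
          _ = s.take m ++ s.drop m := by rw [h0, hrest]
          _ = s := by simp
      · intro h i hi
        have hsplit : s = b ++ (List.replicate n b).flatten := by
          rw [← h]; simp [List.replicate_succ]
        have hdrop : s.drop m = (List.replicate n b).flatten := by
          rw [hsplit, List.drop_left' hb]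
        cases i with
        | zero =>
            rw [Nat.zero_mul, List.drop_zero, hsplit, List.take_left' hb]
        | succ i =>
            have hr := (ih (s.drop m) (by simp [hlen])).mpr hdrop.symm
            have h2 := hr i (by omega)
            rw [List.drop_drop] at h2
            have he : m + i * m = (i + 1) * m := by ring
            rw [he] at h2; exact h2

-- the main agreement lemma for k > 0
lemma agree_pos (id_str : String) (k : Int) (hk : 0 < k) :
    is_invalid_k id_str k = is_invalid_k_alt id_str k := by
  simp only [is_invalid_k, is_invalid_k_alt, PySem.Str.len_eq]
  set s := id_str.toList with hsdef
  by_cases hmod : PySem.Int.mod (s.length : Int) k = 0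
  · simp only [hmod, ne_eq, not_true_eq_false, if_false]
    obtain ⟨n, rfl⟩ : ∃ n : Nat, k = (n : Int) := ⟨k.toNat, (Int.toNat_of_nonneg hk.le).symm⟩
    have hn : 0 < n := by exact_mod_cast hk
    have hdvd : (n : Int) ∣ (s.length : Int) := (PySem.Int.mod_eq_zero_iff_dvd _ _).mp hmod
    have hdvdN : n ∣ s.length := by exact_mod_cast hdvd
    set m := s.length / n with hmdef
    have hs : s.length = n * m := (Nat.mul_div_cancel' hdvdN).symm
    have hfd : PySem.Int.floordiv (s.length : Int) (n : Int) = (m : Int) := by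
      rw [hmdef]; exact PySem.Int.floordiv_natCast s.length n
    have hmle : m ≤ s.length := by
      rw [hs]; exact Nat.le_mul_of_pos_left m hn
    have hb : (s.take m).length = m := by
      rw [List.length_take]; omega
    rw [hfd]
    have hbase : PySem.List.slice s (some 0) (some (m : Int)) = s.take m := by
      rw [PySem.List.slice_zero_start, PySem.List.slice_to_natCast]
    have hbase' : PySem.List.slice s none (some (m : Int)) = s.take m :=
      PySem.List.slice_to_natCast s m
    rw [hbase, hbase', PySem.List.pyRange_zero_nat, List.foldl_map,
        foldl_and_eq_all, Bool.true_and]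
    have hchunk : ∀ i : Nat,
        PySem.List.slice s (some ((i : Int) * (m : Int))) (some (((i : Int) + 1) * (m : Int)))
          = (s.drop (i * m)).take m := by
      intro i
      have h1 : ((i : Int)) * (m : Int) = ((i * m : Nat) : Int) := by push_cast; ring
      have h2 : ((i : Int) + 1) * (m : Int) = ((i * m : Nat) : Int) + (m : Int) := by
        push_cast; ring
      rw [h1, h2, PySem.List.slice_natCast_add]
    rw [Bool.eq_iff_iff]
    simp only [List.all_eq_true, List.mem_range, beq_iff_eq]
    constructor
    · intro h
      refine (chunks_iff n m s (s.take m) hb hs).mp ?_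
      intro i hi
      have := h i hi
      rwa [hchunk i] at this
    · intro h i hi
      rw [hchunk i]
      exact (chunks_iff n m s (s.take m) hb hs).mpr h i hi
  · simp [hmod]

-- ===== VERDICT (by name: the statement is the Claim_ definition above) =====
theorem is_invalid_k_spec : Claim_unchanged_is_invalid_k := by
  intro id_str k _ hk hD
  rcases lt_trichotomy k 0 with hneg | hzero | hpos
  · -- k < 0: outside D_ either the guard fires in both, or the string is empty
    simp only [is_invalid_k, is_invalid_k_alt, PySem.Str.len_eq]
    by_cases hmod : PySem.Int.mod (id_str.length : Int) k = 0
    · have hdvd : k ∣ (id_str.toList.length : Int) := by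
        rw [String.length_toList]
        exact (PySem.Int.mod_eq_zero_iff_dvd _ _).mp hmod
      have hnil : id_str.toList = [] := by
        by_contra hne
        exact hD ⟨hneg, hne, hdvd⟩
      simp [hnil, PySem.List.pyRange_one_eq_nil hneg.le, Int.toNat_of_nonpos hneg.le]
    · simp [hmod]
  · exact absurd hzero hk
  · exact agree_pos id_str k hpos
theorem is_invalid_k_changed : Claim_changed_is_invalid_k := by
  unfold Claim_changed_is_invalid_k; decide
theorem is_invalid_k_tight : Claim_exact_is_invalid_k := by
  intro id_str k _ hk hD
  obtain ⟨hneg, hne, hdvd⟩ := hD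
  have hmod : PySem.Int.mod (id_str.length : Int) k = 0 := by
    rw [← String.length_toList]
    exact (PySem.Int.mod_eq_zero_iff_dvd _ _).mpr hdvd
  have hA : is_invalid_k id_str k = true := by
    simp [is_invalid_k, PySem.Str.len_eq, String.length_toList, hmod,
          PySem.List.pyRange_one_eq_nil hneg.le]
  have hB : is_invalid_k_alt id_str k = false := by
    simp [is_invalid_k_alt, PySem.Str.len_eq, String.length_toList, hmod,
          Int.toNat_of_nonpos hneg.le, hne]
  rw [hA, hB]; decide
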